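-- pv_equiv track=rewrite | github.com/KATOI4423/oops_time | build/merge_licenses.py | extract_handlebars_block
-- ===== SOURCE A (Python) =====
-- def extract_handlebars_block(template: str, block_name: str) -> tuple[str, str, str]:
-- 	"""
-- 	Handlebarsの `#each` ブロック（繰り返し部分）を抽出して返す。
--
-- 	Args:
-- 		template (str): テンプレート文字列
-- 		block_name (str): ブロック名（例: "overview", "licenses"）
--
-- 	Returns:
-- 		tuple[str, str, str]: (全体ブロック, 中身だけ, ブロックをプレースホルダに置き換えたテンプレート)
-- 	"""
-- 	open_tag = "{{#each"
-- 	start_tag = f"{open_tag} {block_name}" + "}}"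
-- 	end_tag = "{{/each}}"
-- 	start_idx = template.find(start_tag)
-- 	if start_tag == -1:
-- 		raise ValueError(f"Not found {start_tag}")
--
-- 	index = start_idx + len(start_tag)
-- 	depth = 1
--
-- 	# ネストされたeachにも対応するため、開始・終了タグのバランスを取る
-- 	while depth > 0:
-- 		next_open = template.find(open_tag, index)
-- 		next_close = template.find(end_tag, index)
-- 		if next_close == -1:
-- 			raise ValueError(f"Not found {end_tag}")
--
-- 		if next_open != -1 and next_open < next_close:
-- 			depth += 1
-- 			index = next_open + len(open_tag)
-- 		else:
-- 			depth -= 1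
-- 			index = next_close + len(end_tag)
--
-- 	full_block = template[start_idx:index]
-- 	inner_content = template[start_idx + len(start_tag): index - len(end_tag)]
--
-- 	# インデントが重複しないように、\n以降に置き換えプレースホルダを挿入
-- 	newline_idx = template.rfind("\n", 0, start_idx)
-- 	remainder = template[:newline_idx+1] + "{{" + f"{block_name}_block" + "}}" + template[index:]
--
-- 	return full_block, inner_content, remainder
-- ===== SOURCE B (Python) =====
-- def extract_handlebars_block(template: str, block_name: str) -> tuple[str, str, str]:
-- 	"""Extract a balanced Handlebars `#each` block (event-list re-implementation).
--
-- 	Preamble and final slicing are kept verbatim from the original (including its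
-- 	dead `start_tag == -1` guard); the tag balancing is done by folding a depth
-- 	counter over a single event list built in one pass instead of repeated finds.
-- 	"""
-- 	open_tag = "{{#each"
-- 	start_tag = f"{open_tag} {block_name}" + "}}"
-- 	end_tag = "{{/each}}"
-- 	start_idx = template.find(start_tag)
-- 	if start_tag == -1:
-- 		raise ValueError(f"Not found {start_tag}")
--
-- 	index = start_idx + len(start_tag)
--
-- 	# One linear pass: collect every tag occurrence at or after `index` as a
-- 	# (position, is_open) event.  Occurrences of the two tags can never overlap,
-- 	# so walking this list in order is the same as balancing with repeated finds.
-- 	events = [(p, template.startswith(open_tag, p))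
-- 	          for p in range(len(template))
-- 	          if p >= index and (template.startswith(open_tag, p)
-- 	                             or template.startswith(end_tag, p))]
--
-- 	depth = 1
-- 	end = None
-- 	for p, is_open in events:
-- 		if is_open:
-- 			depth += 1
-- 		else:
-- 			depth -= 1
-- 			if depth == 0:
-- 				end = p + len(end_tag)
-- 				break
-- 	if end is None:
-- 		raise ValueError(f"Not found {end_tag}")
-- 	index = end
--
-- 	full_block = template[start_idx:index]
-- 	inner_content = template[start_idx + len(start_tag): index - len(end_tag)]
--
-- 	newline_idx = template.rfind("\n", 0, start_idx)
-- 	remainder = template[:newline_idx+1] + "{{" + f"{block_name}_block" + "}}" + template[index:]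
--
-- 	return full_block, inner_content, remainder
-- ===== Notes on version B (the rewrite author's own statement) =====
-- stated objective: alternative
-- what changed: A balances tags by repeatedly re-running str.find for both tags from a moving cursor inside a while loop; B keeps A's preamble and final slicing verbatim but instead makes one linear pass that collects every tag occurrence at or after the start tag into a (position, is_open) event list and then folds a depth counter over that list (tag occurrences can never overlap, so the event order equals A's find order).
import Mathlib
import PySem

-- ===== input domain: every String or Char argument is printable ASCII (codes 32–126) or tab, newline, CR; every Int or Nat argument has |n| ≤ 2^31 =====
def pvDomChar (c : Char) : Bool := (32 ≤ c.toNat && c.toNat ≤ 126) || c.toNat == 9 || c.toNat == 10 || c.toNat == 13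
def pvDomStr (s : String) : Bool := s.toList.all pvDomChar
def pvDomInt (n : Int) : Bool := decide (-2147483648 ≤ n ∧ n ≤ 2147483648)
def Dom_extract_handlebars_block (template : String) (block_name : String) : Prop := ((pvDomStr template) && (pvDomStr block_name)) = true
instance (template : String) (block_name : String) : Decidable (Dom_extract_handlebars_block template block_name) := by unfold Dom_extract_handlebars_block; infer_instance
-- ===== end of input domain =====

-- B replaces A's repeated `str.find` re-scans by one pass collecting all tag occurrences
-- into an event list that a depth fold consumes (objective: alternative decomposition).
-- Return-value equivalence only; neither version mutates its arguments.

-- Constants of the Python source (shared by A and B, which use the same literals).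
def pvOpenTag : List Char := "{{#each".toList
def pvEndTag : List Char := "{{/each}}".toList
def pvStartTag (block_name : String) : List Char :=
  "{{#each ".toList ++ block_name.toList ++ "}}".toList

-- The final lines of A and of B are the identical Python statements; transliterated once.
def pvFinish (tl : List Char) (block_name : String) (start_idx : Int) (stLen : Nat)
    (index : Int) : String × String × String :=
  let full_block := PySem.Chars.slice tl (some start_idx) (some index)
  let inner_content := PySem.Chars.slice tl (some (start_idx + (stLen : Int)))
      (some (index - (pvEndTag.length : Int)))
  let newline_idx := PySem.Chars.rfindFrom tl "\n".toList 0 (some start_idx)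
  let remainder := PySem.Chars.slice tl none (some (newline_idx + 1)) ++ "{{".toList
      ++ block_name.toList ++ "_block".toList ++ "}}".toList
      ++ PySem.Chars.slice tl (some index) none
  (String.ofList full_block, String.ofList inner_content, String.ofList remainder)

-- ===== PORT A =====
-- A's `while depth > 0` loop; the fuel (template length + 1) is an upper bound on the
-- iteration count since `index` strictly grows by ≥ 7 per iteration; `none` = the
-- ValueError "Not found {{/each}}" path (excluded by Pre_).
def pvLoopA (tl : List Char) (index : Int) (depth : Int) : Nat → Option Int
  | 0 => none
  | fuel + 1 =>
    if 0 < depth then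
      let next_open := PySem.Chars.findFrom tl pvOpenTag index
      let next_close := PySem.Chars.findFrom tl pvEndTag index
      if next_close = -1 then none
      else if next_open ≠ -1 ∧ next_open < next_close then
        pvLoopA tl (next_open + (pvOpenTag.length : Int)) (depth + 1) fuel
      else
        pvLoopA tl (next_close + (pvEndTag.length : Int)) (depth - 1) fuel
    else some index

def extract_handlebars_block (template : String) (block_name : String) : String × String × String :=
  let tl := template.toList
  let start_tag := pvStartTag block_name
  let start_idx := PySem.Chars.find tl start_tag
  -- A's guard `if start_tag == -1` compares a str with an int: always False in Python 3
  -- (dead code, never raises), so it is omitted.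
  let index := start_idx + (start_tag.length : Int)
  match pvLoopA tl index 1 (tl.length + 1) with
  | none => ("", "", "")   -- Python A raises ValueError "Not found {{/each}}" here (outside Pre_)
  | some index => pvFinish tl block_name start_idx start_tag.length index

-- ===== PORT B =====
-- exact port of `template.startswith(pat, p)` for 0 ≤ p (every p used comes from range(len(template)))
def pvStartsAt (tl pat : List Char) (p : Int) : Bool := pat.isPrefixOf (tl.drop p.toNat)

-- B's event-list comprehension: every tag occurrence at or after `index`, with its kind.
def pvEvents (tl : List Char) (index : Int) : List (Int × Bool) :=
  ((PySem.List.pyRange 0 (tl.length : Int)).filter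
      (fun p => decide (index ≤ p) &&
        (pvStartsAt tl pvOpenTag p || pvStartsAt tl pvEndTag p))).map
    (fun p => (p, pvStartsAt tl pvOpenTag p))

-- B's `for p, is_open in events` depth fold; `none` = the ValueError path.
def pvLoopB : List (Int × Bool) → Int → Option Int
  | [], _ => none
  | (p, is_open) :: rest, depth =>
    if is_open then pvLoopB rest (depth + 1)
    else if depth - 1 = 0 then some (p + (pvEndTag.length : Int))
    else pvLoopB rest (depth - 1)

def extract_handlebars_block_alt (template : String) (block_name : String) : String × String × String :=
  let tl := template.toList
  let start_tag := pvStartTag block_name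
  let start_idx := PySem.Chars.find tl start_tag
  -- B keeps A's preamble verbatim, including the dead `if start_tag == -1` guard
  -- (a str never equals -1 in Python 3), so it is omitted just as in the port of A.
  let index := start_idx + (start_tag.length : Int)
  match pvLoopB (pvEvents tl index) 1 with
  | none => ("", "", "")   -- Python B raises ValueError "Not found {{/each}}" here (outside Pre_)
  | some index => pvFinish tl block_name start_idx start_tag.length index

-- ===== PRECONDITION & SPEC =====
-- number of occurrences of `pat` starting at a position p with lo ≤ p < j
def pvOccCount (tl pat : List Char) (lo j : Nat) : Nat :=
  (List.range j).countP (fun p => decide (lo ≤ p) && pat.isPrefixOf (tl.drop p))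

-- Pre_ excludes exactly the inputs on which A raises ValueError "Not found {{/each}}":
-- those where, from the cursor right after the start tag (A's find-based cursor, which
-- starts at find(start_tag) + len(start_tag) even when the start tag is absent), no
-- window ever closes one more "{{/each}}" than it opens "{{#each".
def Pre_extract_handlebars_block (template : String) (block_name : String) : Prop :=
  ∃ j ≤ template.toList.length,
    pvOccCount template.toList pvEndTag
        ((PySem.Chars.find template.toList (pvStartTag block_name)
          + ((pvStartTag block_name).length : Int)).toNat) j
      = pvOccCount template.toList pvOpenTag
          ((PySem.Chars.find template.toList (pvStartTag block_name)
            + ((pvStartTag block_name).length : Int)).toNat) j + 1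

instance (template : String) (block_name : String) : Decidable (Pre_extract_handlebars_block template block_name) := by
  unfold Pre_extract_handlebars_block; infer_instance

def pvWitness_extract_handlebars_block : String × String :=
  ("a\n{{#each x}}b{{/each}}c", "x")

def Spec_extract_handlebars_block (template : String) (block_name : String) (out : String × String × String) : Prop := out = extract_handlebars_block_alt template block_name
instance (template : String) (block_name : String) (out : String × String × String) : Decidable (Spec_extract_handlebars_block template block_name out) := by unfold Spec_extract_handlebars_block; infer_instance

-- ===== CLAIM (what is proved, stated in full; the proofs are below) =====
def Claim_equal_extract_handlebars_block : Prop := ∀ (template : String) (block_name : String), Dom_extract_handlebars_block template block_name → Pre_extract_handlebars_block template block_name → Spec_extract_handlebars_block template block_name (extract_handlebars_block template block_name)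

-- ===== LEMMAS AND PROOFS =====

-- an event: some tag occurrence starts at p
def pvEv (tl : List Char) (p : Nat) : Bool :=
  pvOpenTag.isPrefixOf (tl.drop p) || pvEndTag.isPrefixOf (tl.drop p)

-- positions of events at or after i, in increasing order
def pvPoss (tl : List Char) (i : Nat) : List Nat :=
  (List.range tl.length).filter (fun p => decide (i ≤ p) && pvEv tl p)

lemma pvPoss_eq (tl : List Char) (i : Nat) :
    pvPoss tl i
      = ((List.range tl.length).filter (pvEv tl)).filter (fun q => decide (i ≤ q)) := by
  rw [pvPoss, List.filter_filter]

lemma pv_ev_lt_len {tl : List Char} {p : Nat} (h : pvEv tl p = true) : p < tl.length := by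
  rw [pvEv, Bool.or_eq_true] at h
  by_contra hge
  rw [Nat.not_lt] at hge
  have hd : tl.drop p = [] := List.drop_eq_nil_of_le hge
  rcases h with h | h <;> rw [hd, List.isPrefixOf_iff_prefix, List.prefix_nil] at h <;> simp [pvOpenTag, pvEndTag] at h

lemma pv_not_both {tl : List Char} {p : Nat} (ho : pvOpenTag <+: tl.drop p)
    (hc : pvEndTag <+: tl.drop p) : False := by
  rcases List.prefix_or_prefix_of_prefix ho hc with h | h
  · revert h; decide
  · revert h; decide

lemma pv_loopB_all_open {M : List (Int × Bool)} (h : ∀ e ∈ M, e.2 = true) (d : Int) :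
    pvLoopB M d = none := by
  induction M generalizing d with
  | nil => rfl
  | cons e rest ih =>
    obtain ⟨p, b⟩ := e
    have hb : b = true := h _ (List.mem_cons_self ..)
    subst hb
    rw [pvLoopB, if_pos rfl]
    exact ih (fun e he => h e (List.mem_cons_of_mem _ he)) _

lemma pv_prefix_getElem {tl pat : List Char} {p d : Nat} (h : pat <+: tl.drop p)
    (hd : d < pat.length) : tl[p + d]? = some (pat[d]) := by
  have hlen : pat.length ≤ (tl.drop p).length := h.length_le
  have hlt : d < (tl.drop p).length := by omega
  have h1 : (tl.drop p)[d] = pat[d] := (h.getElem hd).symm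
  have h2 : (tl.drop p)[d] = tl[p + d]'(by rw [List.length_drop] at hlt; omega) :=
    List.getElem_drop
  rw [List.getElem?_eq_getElem (by rw [List.length_drop] at hlt; omega)]
  rw [← h2, h1]

lemma pv_no_overlap {tl : List Char} {pat1 pat2 : List Char}
    (h1 : pat1 = pvOpenTag ∨ pat1 = pvEndTag) (h2 : pat2 = pvOpenTag ∨ pat2 = pvEndTag)
    {p q : Nat} (hp : pat1 <+: tl.drop p) (hq : pat2 <+: tl.drop q) (hlt : p < q) :
    p + pat1.length ≤ q := by
  by_contra hcon
  rw [Nat.not_le] at hcon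
  set d := q - p with hd
  have hd1 : 1 ≤ d := by omega
  have hd2 : d < pat1.length := by omega
  have hpd : p + d = q := by omega
  have hq0 : tl[q + 0]? = some (pat2[0]'(by rcases h2 with h | h <;> subst h <;> decide)) :=
    pv_prefix_getElem hq (by rcases h2 with h | h <;> subst h <;> decide)
  have hq0' : tl[q]? = some '{' := by
    rw [Nat.add_zero] at hq0
    rw [hq0]
    rcases h2 with h | h <;> subst h <;> rfl
  have he1 : tl[q]? = some (pat1[d]'hd2) := by rw [← hpd]; exact pv_prefix_getElem hp hd2
  have hmain : pat1[d]'hd2 = '{' := by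
    rw [hq0'] at he1
    exact (Option.some.inj he1).symm
  have hq1 : tl[q + 1]? = some (pat2[1]'(by rcases h2 with h | h <;> subst h <;> decide)) :=
    pv_prefix_getElem hq (by rcases h2 with h | h <;> subst h <;> decide)
  have hq1' : tl[q + 1]? = some '{' := by
    rw [hq1]
    rcases h2 with h | h <;> subst h <;> rfl
  rcases h1 with h | h <;> subst h
  · have hTag : ∀ dd, (hdd : dd < pvOpenTag.length) → pvOpenTag[dd] = '{' → dd = 0 ∨ dd = 1 := by
      decide
    rcases hTag d hd2 hmain with h0 | h0
    · omega
    · have he2 : tl[q + 1]? = some (pvOpenTag[2]'(by decide)) := by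
        have hqe : q + 1 = p + 2 := by omega
        rw [hqe]
        exact pv_prefix_getElem hp (by decide)
      rw [hq1'] at he2
      have : ('{' : Char) = pvOpenTag[2]'(by decide) := Option.some.inj he2
      revert this; decide
  · have hTag : ∀ dd, (hdd : dd < pvEndTag.length) → pvEndTag[dd] = '{' → dd = 0 ∨ dd = 1 := by
      decide
    rcases hTag d hd2 hmain with h0 | h0
    · omega
    · have he2 : tl[q + 1]? = some (pvEndTag[2]'(by decide)) := by
        have hqe : q + 1 = p + 2 := by omega
        rw [hqe]
        exact pv_prefix_getElem hp (by decide)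
      rw [hq1'] at he2
      have : ('{' : Char) = pvEndTag[2]'(by decide) := Option.some.inj he2
      revert this; decide

lemma pv_prefix_drop_infix {tl pat : List Char} {i p : Nat} (hip : i ≤ p)
    (h : pat <+: tl.drop p) : pat <:+: tl.drop i := by
  have : pat <+: (tl.drop i).drop (p - i) := by
    rw [List.drop_drop]
    have he : i + (p - i) = p := by omega
    rwa [he]
  exact this.isInfix.trans (List.drop_suffix _ _).isInfix

lemma pv_findFrom_past (tl pat : List Char) {i : Nat} (hi : tl.length < i) :
    PySem.Chars.findFrom tl pat (i : Int) = -1 := by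
  have h0 : ¬((i : Int) < 0) := by omega
  have h1 : ((tl.length : Int)) < (i : Int) := by exact_mod_cast hi
  simp only [PySem.Chars.findFrom, if_neg h0, if_pos h1]

lemma pv_findFrom_neg_iff (tl pat : List Char) (hne : pat ≠ []) (i : Nat) :
    PySem.Chars.findFrom tl pat (i : Int) = -1 ↔ ∀ p, i ≤ p → ¬ pat <+: tl.drop p := by
  by_cases hi : i ≤ tl.length
  · rw [PySem.Chars.findFrom_natCast_eq_neg_one_iff tl pat i hi]
    constructor
    · intro h p hip hocc
      exact h (pv_prefix_drop_infix hip hocc)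
    · intro h hinf
      obtain ⟨s, t, hst⟩ := hinf
      have : pat <+: (tl.drop i).drop s.length := by
        rw [← hst]; simp
      rw [List.drop_drop] at this
      exact h _ (by omega) this
  · rw [Nat.not_le] at hi
    constructor
    · intro _ p hip hocc
      have hlen : pat.length ≤ (tl.drop p).length := hocc.length_le
      rw [List.length_drop] at hlen
      have : pat.length = 0 := by omega
      exact hne (List.eq_nil_of_length_eq_zero this)
    · intro _
      exact pv_findFrom_past tl pat hi

lemma pv_findFrom_eq_first (tl pat : List Char) (hne : pat ≠ []) {i p : Nat}
    (hip : i ≤ p) (hocc : pat <+: tl.drop p)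
    (hmin : ∀ q, i ≤ q → q < p → ¬ pat <+: tl.drop q) :
    PySem.Chars.findFrom tl pat (i : Int) = (p : Int) := by
  have hplen : p + pat.length ≤ tl.length := by
    have := hocc.length_le
    rw [List.length_drop] at this
    rcases Nat.lt_or_ge p tl.length with h | h
    · omega
    · exfalso
      have hd : tl.drop p = [] := List.drop_eq_nil_of_le h
      rw [hd, List.prefix_nil] at hocc
      exact hne hocc
  have hplt : p < tl.length := by
    have : 0 < pat.length := List.length_pos_of_ne_nil hne
    omega
  have hi : i ≤ tl.length := le_trans hip (le_of_lt hplt)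
  have hne' : PySem.Chars.findFrom tl pat (i : Int) ≠ -1 := by
    intro hcon
    exact (pv_findFrom_neg_iff tl pat hne i).mp hcon p hip hocc
  obtain ⟨hge, hocc', hmin'⟩ := PySem.Chars.findFrom_natCast_spec tl pat i hi hne'
  set r := PySem.Chars.findFrom tl pat (i : Int) with hr
  have hr0 : 0 ≤ r := le_trans (by exact_mod_cast Nat.zero_le i) hge
  have hge' : i ≤ r.toNat := by omega
  have h1 : ¬ r.toNat < p := fun hlt => hmin r.toNat hge' hlt hocc'
  have h2 : ¬ p < r.toNat := fun hlt => hmin' p hip hlt hocc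
  have : r.toNat = p := by omega
  omega

lemma pv_pyRange_len (n : Nat) :
    PySem.List.pyRange 0 (n : Int) = (List.range n).map (fun (k : Nat) => (k : Int)) := by
  rw [PySem.List.pyRange_of_pos _ _ (by norm_num)]
  rcases Nat.eq_zero_or_pos n with h | h
  · subst h; simp
  · rw [if_pos (by exact_mod_cast h)]
    have h1 : ((n : Int) - 0 + 1 - 1) / 1 = (n : Int) := by omega
    rw [h1, Int.toNat_natCast]
    apply List.map_congr_left
    intro a _
    omega

lemma pv_events_eq (tl : List Char) (i : Nat) :
    pvEvents tl (i : Int)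
      = (pvPoss tl i).map (fun (p : Nat) => ((p : Int), pvOpenTag.isPrefixOf (tl.drop p))) := by
  rw [pvEvents, pvPoss, pv_pyRange_len, List.filter_map, List.map_map]
  have hf : (List.range tl.length).filter
        ((fun p => decide ((i : Int) ≤ p) && (pvStartsAt tl pvOpenTag p || pvStartsAt tl pvEndTag p))
          ∘ (fun (k : Nat) => (k : Int)))
      = (List.range tl.length).filter (fun p => decide (i ≤ p) && pvEv tl p) := by
    apply List.filter_congr
    intro a _
    simp [Function.comp, pvStartsAt, pvEv]
  rw [hf]
  apply List.map_congr_left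
  intro a _
  simp [Function.comp, pvStartsAt]

lemma pv_filter_tail {i p m : Nat} :
    ∀ (E : List Nat) (R : List Nat), E.Pairwise (· < ·) →
      E.filter (fun q => decide (i ≤ q)) = p :: R →
      (∀ q ∈ E, p < q → m ≤ q) → i ≤ p → p < m →
      R = E.filter (fun q => decide (m ≤ q)) := by
  intro E
  induction E with
  | nil => intro R _ h _ _ _; simp at h
  | cons e E' ih =>
    intro R hpw h hgap hip hpm
    obtain ⟨he, hpw'⟩ := List.pairwise_cons.mp hpw
    rw [List.filter_cons] at h
    by_cases hie : i ≤ e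
    · rw [if_pos (by simpa using hie)] at h
      obtain ⟨rfl, hR⟩ : e = p ∧ E'.filter (fun q => decide (i ≤ q)) = R := by
        have := List.cons.inj h
        exact ⟨this.1, this.2⟩
      rw [List.filter_cons, if_neg (by simp only [decide_eq_true_eq]; omega)]
      rw [← hR]
      apply List.filter_congr
      intro q hq
      have h1 : e < q := he q hq
      have h2 : m ≤ q := hgap q (List.mem_cons_of_mem _ hq) h1
      rw [decide_eq_decide]
      omega
    · rw [if_neg (by simpa using hie)] at h
      rw [List.filter_cons, if_neg ?_]
      · exact ih R hpw' h (fun q hq hpq => hgap q (List.mem_cons_of_mem _ hq) hpq) hip hpm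
      · simp only [decide_eq_true_eq]
        omega

lemma pv_poss_cons {tl : List Char} {i p : Nat} {L' : List Nat}
    (h : pvPoss tl i = p :: L') :
    i ≤ p ∧ pvEv tl p = true ∧ (∀ q, i ≤ q → q < p → pvEv tl q = false) ∧
      L' = pvPoss tl (p + (if pvOpenTag.isPrefixOf (tl.drop p) then 7 else 9)) := by
  have hE : pvPoss tl i = ((List.range tl.length).filter (pvEv tl)).filter (fun q => decide (i ≤ q)) :=
    pvPoss_eq tl i
  set E := (List.range tl.length).filter (pvEv tl) with hEdef
  have hpw : E.Pairwise (· < ·) := List.Pairwise.filter _ List.pairwise_lt_range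
  have h' : E.filter (fun q => decide (i ≤ q)) = p :: L' := by rw [← hE, h]
  have hpmem : p ∈ E ∧ i ≤ p := by
    have : p ∈ E.filter (fun q => decide (i ≤ q)) := by rw [h']; exact List.mem_cons_self ..
    rw [List.mem_filter] at this
    exact ⟨this.1, by simpa using this.2⟩
  have hev : pvEv tl p = true := by
    have := hpmem.1
    rw [hEdef, List.mem_filter] at this
    exact this.2
  have hmin : ∀ q, i ≤ q → q < p → pvEv tl q = false := by
    intro q hiq hqp
    by_contra hq
    rw [Bool.not_eq_false] at hq
    have hqlen : q < tl.length := pv_ev_lt_len hq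
    have hqE : q ∈ E := by
      rw [hEdef, List.mem_filter]
      exact ⟨List.mem_range.mpr hqlen, hq⟩
    have : q ∈ E.filter (fun q => decide (i ≤ q)) := by
      rw [List.mem_filter]
      exact ⟨hqE, by simpa using hiq⟩
    rw [h'] at this
    rcases List.mem_cons.mp this with rfl | hmem
    · omega
    · have hpl : (E.filter (fun q => decide (i ≤ q))).Pairwise (· < ·) :=
        List.Pairwise.filter _ hpw
      rw [h'] at hpl
      have := (List.pairwise_cons.mp hpl).1 q hmem
      omega
  refine ⟨hpmem.2, hev, hmin, ?_⟩
  set m := p + (if pvOpenTag.isPrefixOf (tl.drop p) then 7 else 9) with hm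
  have hgap : ∀ q ∈ E, p < q → m ≤ q := by
    intro q hqE hpq
    have hqev : pvEv tl q = true := by
      rw [hEdef, List.mem_filter] at hqE
      exact hqE.2
    rw [pvEv, Bool.or_eq_true, List.isPrefixOf_iff_prefix, List.isPrefixOf_iff_prefix] at hqev
    have h2 : ∃ pat2, (pat2 = pvOpenTag ∨ pat2 = pvEndTag) ∧ pat2 <+: tl.drop q := by
      rcases hqev with hx | hx
      exacts [⟨pvOpenTag, Or.inl rfl, hx⟩, ⟨pvEndTag, Or.inr rfl, hx⟩]
    obtain ⟨pat2, hpat2, hq2⟩ := h2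
    rw [pvEv, Bool.or_eq_true] at hev
    by_cases ho : pvOpenTag.isPrefixOf (tl.drop p)
    · have hp1 : pvOpenTag <+: tl.drop p := List.isPrefixOf_iff_prefix.mp ho
      have := pv_no_overlap (Or.inl rfl) hpat2 hp1 hq2 hpq
      rw [hm, if_pos ho]
      simpa using this
    · have hc : pvEndTag.isPrefixOf (tl.drop p) = true := by
        rcases hev with hx | hx
        · exact absurd hx ho
        · exact hx
      have hp1 : pvEndTag <+: tl.drop p := List.isPrefixOf_iff_prefix.mp hc
      have := pv_no_overlap (Or.inr rfl) hpat2 hp1 hq2 hpq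
      rw [hm, if_neg ho]
      simpa using this
  have hpm : p < m := by rw [hm]; split <;> omega
  have := pv_filter_tail E L' hpw h' hgap hpmem.2 hpm
  rw [this, pvPoss_eq]


-- the central simulation: A's find/find loop equals B's fold over the event list
lemma pv_loop_eq (tl : List Char) :
    ∀ (L : List Nat) (i : Nat) (depth : Int) (fuel : Nat),
      pvPoss tl i = L → L.length < fuel → 0 < depth →
      pvLoopA tl (i : Int) depth fuel
        = pvLoopB ((L.map (fun (p : Nat) => ((p : Int), pvOpenTag.isPrefixOf (tl.drop p))))) depth := by
  intro L
  induction L with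
  | nil =>
    intro i depth fuel h hfuel hdepth
    obtain ⟨f, rfl⟩ : ∃ f, fuel = f + 1 := ⟨fuel - 1, by omega⟩
    have hclose : PySem.Chars.findFrom tl pvEndTag (i : Int) = -1 := by
      rw [pv_findFrom_neg_iff tl pvEndTag (by decide) i]
      intro p hip hocc
      have hev : pvEv tl p = true := by
        rw [pvEv, Bool.or_eq_true, List.isPrefixOf_iff_prefix, List.isPrefixOf_iff_prefix]
        exact Or.inr hocc
      have hplen : p < tl.length := pv_ev_lt_len hev
      have : p ∈ pvPoss tl i := by
        rw [pvPoss, List.mem_filter]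
        exact ⟨List.mem_range.mpr hplen, by simp [hip, hev]⟩
      rw [h] at this
      simp at this
    simp only [pvLoopA, pvLoopB, List.map_nil]
    rw [if_pos hdepth, if_pos hclose]
  | cons p L' ih =>
    intro i depth fuel h hfuel hdepth
    obtain ⟨f, rfl⟩ : ∃ f, fuel = f + 1 := ⟨fuel - 1, by omega⟩
    obtain ⟨hip, hev, hmin, hL'⟩ := pv_poss_cons h
    have hplen : p < tl.length := pv_ev_lt_len hev
    have hilen : i ≤ tl.length := by omega
    by_cases ho : pvOpenTag.isPrefixOf (tl.drop p)
    · -- the first event is an open tag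
      have hoP : pvOpenTag <+: tl.drop p := List.isPrefixOf_iff_prefix.mp ho
      have hopen : PySem.Chars.findFrom tl pvOpenTag (i : Int) = (p : Int) := by
        apply pv_findFrom_eq_first tl pvOpenTag (by decide) hip hoP
        intro q hiq hqp hocc
        have : pvEv tl q = false := hmin q hiq hqp
        rw [pvEv, Bool.or_eq_false_iff] at this
        rw [← List.isPrefixOf_iff_prefix] at hocc
        rw [this.1] at hocc
        exact Bool.false_ne_true hocc
      by_cases hc : PySem.Chars.findFrom tl pvEndTag (i : Int) = -1
      · -- no close tag anywhere after i: A raises, B's fold runs dry (all events are opens)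
        have hnoC : ∀ q, i ≤ q → ¬ pvEndTag <+: tl.drop q :=
          (pv_findFrom_neg_iff tl pvEndTag (by decide) i).mp hc
        have hall : ∀ e ∈ ((p :: L').map (fun (p : Nat) => ((p : Int), pvOpenTag.isPrefixOf (tl.drop p)))), e.2 = true := by
          intro e he
          rw [List.mem_map] at he
          obtain ⟨q, hq, rfl⟩ := he
          have hqmem : q ∈ pvPoss tl i := by rw [h]; exact hq
          rw [pvPoss, List.mem_filter] at hqmem
          have hqi : i ≤ q := by
            have := hqmem.2
            rw [Bool.and_eq_true, decide_eq_true_eq] at this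
            exact this.1
          have hqev : pvEv tl q = true := by
            have := hqmem.2
            rw [Bool.and_eq_true] at this
            exact this.2
          rw [pvEv, Bool.or_eq_true] at hqev
          rcases hqev with hx | hx
          · exact hx
          · exact absurd (List.isPrefixOf_iff_prefix.mp hx) (hnoC q hqi)
        rw [pv_loopB_all_open hall]
        simp only [pvLoopA]
        rw [if_pos hdepth, if_pos hc]
      · -- a close tag exists: it lies strictly after p, so A consumes the open at p
        obtain ⟨hge, hoccC, hminC⟩ := PySem.Chars.findFrom_natCast_spec tl pvEndTag i hilen hc
        set c := PySem.Chars.findFrom tl pvEndTag (i : Int) with hcdef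
        have hc0 : 0 ≤ c := by omega
        have hcev : pvEv tl c.toNat = true := by
          rw [pvEv, Bool.or_eq_true, List.isPrefixOf_iff_prefix, List.isPrefixOf_iff_prefix]
          exact Or.inr hoccC
        have hcge : i ≤ c.toNat := by omega
        have hcp : p < c.toNat := by
          rcases Nat.lt_trichotomy c.toNat p with hx | hx | hx
          · exact absurd hcev (by rw [hmin c.toNat hcge hx]; exact Bool.false_ne_true)
          · rw [hx] at hoccC
            exact (pv_not_both hoP hoccC).elim
          · exact hx
        have hcond : PySem.Chars.findFrom tl pvOpenTag (i : Int) ≠ -1 ∧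
            PySem.Chars.findFrom tl pvOpenTag (i : Int) < c := by
          constructor
          · rw [hopen]; omega
          · rw [hopen]; omega
        simp only [pvLoopA, pvLoopB, List.map_cons]
        rw [if_pos hdepth, if_neg (by rw [← hcdef]; exact hc), if_pos hcond, hopen, if_pos ho]
        have hlen7 : (pvOpenTag.length : Int) = 7 := by decide
        have hcast : (p : Int) + (7 : Int) = ((p + 7 : Nat) : Int) := by push_cast; ring
        rw [hlen7, hcast]
        refine ih (p + 7) (depth + 1) f ?_ ?_ (by omega)
        · rw [hL', if_pos ho]
        · have := hfuel
          simp only [List.length_cons] at this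
          omega
    · -- the first event is a close tag
      have hcP : pvEndTag <+: tl.drop p := by
        rw [pvEv, Bool.or_eq_true] at hev
        rcases hev with hx | hx
        · exact absurd hx ho
        · exact List.isPrefixOf_iff_prefix.mp hx
      have hclose : PySem.Chars.findFrom tl pvEndTag (i : Int) = (p : Int) := by
        apply pv_findFrom_eq_first tl pvEndTag (by decide) hip hcP
        intro q hiq hqp hocc
        have : pvEv tl q = false := hmin q hiq hqp
        rw [pvEv, Bool.or_eq_false_iff] at this
        rw [← List.isPrefixOf_iff_prefix] at hocc
        rw [this.2] at hocc
        exact Bool.false_ne_true hocc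
      have hocond : ¬ (PySem.Chars.findFrom tl pvOpenTag (i : Int) ≠ -1 ∧
          PySem.Chars.findFrom tl pvOpenTag (i : Int) < (p : Int)) := by
        rintro ⟨hne, hlt⟩
        obtain ⟨hge, hoccO, hminO⟩ := PySem.Chars.findFrom_natCast_spec tl pvOpenTag i hilen hne
        set o := PySem.Chars.findFrom tl pvOpenTag (i : Int) with hodef
        have ho0 : 0 ≤ o := by omega
        have hop : o.toNat < p := by omega
        have hoi : i ≤ o.toNat := by omega
        have : pvEv tl o.toNat = false := hmin o.toNat hoi hop
        rw [pvEv, Bool.or_eq_false_iff] at this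
        rw [← List.isPrefixOf_iff_prefix] at hoccO
        rw [this.1] at hoccO
        exact Bool.false_ne_true hoccO
      simp only [pvLoopA, pvLoopB, List.map_cons]
      rw [if_pos hdepth, hclose, if_neg (show ¬((p : Int) = -1) by omega), if_neg hocond,
        if_neg (show ¬(pvOpenTag.isPrefixOf (tl.drop p) = true) from ho)]
      by_cases hd : depth - 1 = 0
      · rw [if_pos hd]
        have hf1 : 1 ≤ f := by
          simp only [List.length_cons] at hfuel
          omega
        obtain ⟨f', rfl⟩ : ∃ f', f = f' + 1 := ⟨f - 1, by omega⟩
        simp only [pvLoopA]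
        rw [if_neg (by omega : ¬ (0 : Int) < depth - 1)]
      · rw [if_neg hd]
        have hlen9 : (pvEndTag.length : Int) = 9 := by decide
        have hcast : (p : Int) + (9 : Int) = ((p + 9 : Nat) : Int) := by push_cast; ring
        rw [hlen9, hcast]
        refine ih (p + 9) (depth - 1) f ?_ ?_ (by omega)
        · rw [hL', if_neg ho]
        · have := hfuel
          simp only [List.length_cons] at this
          omega

-- ===== VERDICT (by name: the statement is the Claim_ definition above) =====
theorem extract_handlebars_block_spec : Claim_equal_extract_handlebars_block := by
  intro template block_name _hdom _hpre
  unfold Spec_extract_handlebars_block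
  unfold extract_handlebars_block extract_handlebars_block_alt
  simp only []
  set tl := template.toList with htl
  set st := pvStartTag block_name with hst
  have h10 : (10 : Int) ≤ (st.length : Int) := by
    rw [hst, pvStartTag]
    simp only [List.length_append]
    have : ("{{#each ".toList.length = 8) ∧ ("}}".toList.length = 2) := by decide
    omega
  have h0 : 0 ≤ PySem.Chars.find tl st + (st.length : Int) := by
    have := PySem.Chars.neg_one_le_find tl st
    omega
  have hcast : PySem.Chars.find tl st + (st.length : Int)
      = (((PySem.Chars.find tl st + (st.length : Int)).toNat : Nat) : Int) := by
    omega
  rw [hcast]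
  set i0 : Nat := (PySem.Chars.find tl st + (st.length : Int)).toNat with hi0
  rw [pv_events_eq tl i0]
  have hlenposs : (pvPoss tl i0).length < tl.length + 1 := by
    have h1 : (pvPoss tl i0).length ≤ (List.range tl.length).length := by
      rw [pvPoss]
      exact List.length_filter_le _ _
    rw [List.length_range] at h1
    omega
  rw [← pv_loop_eq tl (pvPoss tl i0) i0 1 (tl.length + 1) rfl hlenposs (by norm_num)]
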